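-- pv_equiv track=rewrite | github.com/disintar/toncli | src/toncli/modules/utils/lite_client/parser.py | split_get_output
-- ===== SOURCE A (Python) =====
-- def split_get_output(output: str):
--     """'
--     Parse output like:
--     -1 0 CS{Cell{...} bits: 64..66; refs: 0..0} CS{Cell{...} bits: 66..333; refs: 0..0} C{...}
--     To:
--     [-1, 0, "CS{Cell{...} bits: 64..66; refs: 0..0}", "CS{Cell{...} bits: 66..333; refs: 0..0}", "C{...}"]
--
--     """
--
--     data = output.split()
--     result = []
--
--     to_fix = 0
--     for i in data:
--         if to_fix > 0:
--             result[-1] += f" {i}"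
--         else:
--             result.append(i)
--
--         tmp_to_fix = i.count('{')
--         tmp_to_not_fix = i.count("}")
--         to_fix += tmp_to_fix - tmp_to_not_fix
--
--     return result
-- ===== SOURCE B (Python) =====
-- def split_get_output(output: str):
--     # Single character-by-character pass: maintain a brace-depth counter; a
--     # whitespace run at depth <= 0 ends the current token, a whitespace run at
--     # positive depth becomes one normalized space inside the current token.
--     result = []
--     buf = []
--     depth = 0
--     pending = False  # whitespace seen inside a brace group, space not yet emitted
--     for ch in output:
--         if ch.isspace():
--             if depth <= 0:
--                 if buf:
--                     result.append(''.join(buf))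
--                     buf = []
--                 pending = False
--             elif buf:
--                 pending = True
--         else:
--             if pending:
--                 buf.append(' ')
--                 pending = False
--             buf.append(ch)
--             if ch == '{':
--                 depth += 1
--             elif ch == '}':
--                 depth -= 1
--     if buf:
--         result.append(''.join(buf))
--     return result
-- ===== Notes on version B (the rewrite author's own statement) =====
-- stated objective: alternative
-- what changed: Replaces A's output.split() followed by a merge-into-last-element loop over tokens with a single character-by-character scan that keeps a live brace-depth counter and a pending-space flag, flushing the buffered token at top-level whitespace runs.
import Mathlib
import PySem

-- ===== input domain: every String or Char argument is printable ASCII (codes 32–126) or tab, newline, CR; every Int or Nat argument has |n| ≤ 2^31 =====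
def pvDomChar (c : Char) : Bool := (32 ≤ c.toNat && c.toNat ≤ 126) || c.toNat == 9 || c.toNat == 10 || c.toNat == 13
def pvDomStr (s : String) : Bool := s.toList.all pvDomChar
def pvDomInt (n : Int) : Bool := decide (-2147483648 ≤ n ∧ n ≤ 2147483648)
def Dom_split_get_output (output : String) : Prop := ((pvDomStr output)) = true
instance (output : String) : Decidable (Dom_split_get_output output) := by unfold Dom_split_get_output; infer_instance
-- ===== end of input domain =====

-- B replaces A's split()-then-merge token loop by a single character scan with a
-- live brace-depth counter (objective: alternative decomposition, same O(n) cost).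

-- ===== PORT A =====
-- i.count('{') - i.count('}') for one token
def pvBraceDelta (t : List Char) : Int :=
  ((PySem.Chars.count t ['{'] : Int)) - ((PySem.Chars.count t ['}'] : Int))

-- result[-1] += cs  (Python raises on []; A never reaches that: to_fix starts at 0)
def pvAppendLast : List (List Char) → List Char → List (List Char)
  | [], _ => []
  | [r], cs => [r ++ cs]
  | r :: rest, cs => r :: pvAppendLast rest cs

-- the 'for i in data' loop over the split tokens, state (to_fix, result)
def pvSplitA_go : List (List Char) → Int → List (List Char) → List (List Char)
  | [], _, result => result
  | i :: rest, to_fix, result =>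
    pvSplitA_go rest (to_fix + pvBraceDelta i)
      (if to_fix > 0 then pvAppendLast result (' ' :: i) else result ++ [i])

def split_get_output (output : String) : List String :=
  (pvSplitA_go (PySem.Chars.split₀ output.toList) 0 []).map String.ofList

-- ===== PORT B =====
def pvCharDelta (c : Char) : Int :=
  (if c = '{' then 1 else 0) - (if c = '}' then 1 else 0)

-- 'if buf: result.append(''.join(buf))'
def pvFlush (result : List (List Char)) (buf : List Char) : List (List Char) :=
  if buf = [] then result else result ++ [buf]

-- the 'for ch in output' scan, state (result, buf, pending, depth)
def pvSplitB_go : List Char → List (List Char) → List Char → Bool → Int → List (List Char)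
  | [], result, buf, _, _ => pvFlush result buf
  | c :: rest, result, buf, pending, depth =>
    if PySem.Chars.isspace c then
      if depth ≤ 0 then pvSplitB_go rest (pvFlush result buf) [] false depth
      else pvSplitB_go rest result buf (if buf = [] then pending else true) depth
    else
      pvSplitB_go rest result ((if pending then buf ++ [' '] else buf) ++ [c]) false
        (depth + pvCharDelta c)

def split_get_output_alt (output : String) : List String :=
  (pvSplitB_go output.toList [] [] false 0).map String.ofList

-- ===== PRECONDITION & SPEC =====
def Spec_split_get_output (output : String) (out : List String) : Prop := out = split_get_output_alt output
instance (output : String) (out : List String) : Decidable (Spec_split_get_output output out) := by unfold Spec_split_get_output; infer_instance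

-- ===== CLAIM (what is proved, stated in full; the proofs are below) =====
def Claim_equal_split_get_output : Prop := ∀ (output : String), Dom_split_get_output output → Spec_split_get_output output (split_get_output output)

-- ===== LEMMAS AND PROOFS =====

-- brace balance of a character list (the proof's bookkeeping quantity)
def pvBD (l : List Char) : Int := ((l.count '{' : Int)) - ((l.count '}' : Int))

lemma pv_count_go_single (c : Char) (l : List Char) :
    ∀ (fuel acc : Nat), l.length ≤ fuel →
      PySem.Chars.count.go [c] fuel l acc = acc + l.count c := by
  induction l with
  | nil => intro fuel acc _; cases fuel <;> simp [PySem.Chars.count.go]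
  | cons h t ih =>
      intro fuel acc hf
      cases fuel with
      | zero => simp at hf
      | succ f =>
          simp only [PySem.Chars.count.go]
          by_cases hc : c = h
          · subst hc
            rw [if_pos (by simp [List.isPrefixOf])]
            simp only [List.length_cons, List.length_nil, List.drop_succ_cons,
              List.drop_zero]
            rw [ih f (acc + 1) (by simpa using hf), List.count_cons_self]
            omega
          · rw [if_neg (by simp [List.isPrefixOf, hc])]
            rw [ih f acc (by simpa using hf)]
            simp [(Ne.symm hc : ¬ h = c)]

lemma pv_count_single (t : List Char) (c : Char) :
    PySem.Chars.count t [c] = t.count c := by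
  rw [PySem.Chars.count, if_neg (by simp)]
  simpa using pv_count_go_single c t t.length 0 le_rfl

lemma pv_braceDelta_eq (t : List Char) : pvBraceDelta t = pvBD t := by
  simp [pvBraceDelta, pvBD, pv_count_single]

lemma pvBD_nil : pvBD [] = 0 := by simp [pvBD]

lemma pvBD_append_singleton (w : List Char) (c : Char) :
    pvBD (w ++ [c]) = pvBD w + pvCharDelta c := by
  by_cases h1 : c = '{' <;> by_cases h2 : c = '}' <;>
    simp_all [pvBD, pvCharDelta, List.count_append] <;> ring

lemma pv_appendLast_append (result : List (List Char)) (x cs : List Char) :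
    pvAppendLast (result ++ [x]) cs = result ++ [x ++ cs] := by
  induction result with
  | nil => rfl
  | cons a as ih =>
      cases as with
      | nil => simp [pvAppendLast]
      | cons b bs => simpa [pvAppendLast] using ih

lemma pv_split_go_acc (cs : List Char) :
    ∀ cur acc, PySem.Chars.split₀.go cs cur acc =
      acc.reverse ++ PySem.Chars.split₀.go cs cur [] := by
  induction cs with
  | nil =>
      intro cur acc
      by_cases h : cur.isEmpty <;> simp [PySem.Chars.split₀.go, h]
  | cons c rest ih =>
      intro cur acc
      simp only [PySem.Chars.split₀.go]
      by_cases hs : PySem.Chars.isspace c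
      · rw [if_pos hs, if_pos hs]
        by_cases hc : cur.isEmpty = true
        · rw [if_pos hc, if_pos hc]; exact ih [] acc
        · rw [if_neg hc, if_neg hc, ih [] (cur.reverse :: acc), ih [] [cur.reverse]]
          simp
      · rw [if_neg hs, if_neg hs]
        exact ih (c :: cur) acc

-- unfolding helpers for the two loops
lemma pv_go_space_nil (c : Char) (rest : List Char) (acc : List (List Char))
    (hs : PySem.Chars.isspace c = true) :
    PySem.Chars.split₀.go (c :: rest) [] acc = PySem.Chars.split₀.go rest [] acc := by
  simp [PySem.Chars.split₀.go, hs]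

lemma pv_go_space (c : Char) (rest w : List Char) (hs : PySem.Chars.isspace c = true)
    (hw : w ≠ []) :
    PySem.Chars.split₀.go (c :: rest) w.reverse [] =
      w :: PySem.Chars.split₀.go rest [] [] := by
  have h1 : (w.reverse).isEmpty = false := by simp [hw]
  simp only [PySem.Chars.split₀.go, hs, h1, Bool.false_eq_true, if_false, if_true,
    List.reverse_reverse]
  rw [pv_split_go_acc rest [] [w]]
  simp

lemma pv_go_nonspace (c : Char) (rest w : List Char)
    (hs : ¬ PySem.Chars.isspace c = true) :
    PySem.Chars.split₀.go (c :: rest) w.reverse [] =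
      PySem.Chars.split₀.go rest ((w ++ [c]).reverse) [] := by
  simp [PySem.Chars.split₀.go, hs]

lemma pvA_cons (t : List Char) (T : List (List Char)) (d0 : Int)
    (result : List (List Char)) :
    pvSplitA_go (t :: T) d0 result =
      pvSplitA_go T (d0 + pvBD t)
        (if d0 > 0 then pvAppendLast result (' ' :: t) else result ++ [t]) := by
  rw [pvSplitA_go, pv_braceDelta_eq]

-- the core invariant: B's scan state vs A's token loop, three reachable configurations
lemma pv_main (cs : List Char) :
    (∀ result w (d0 : Int), d0 ≤ 0 →
       pvSplitB_go cs result w false (d0 + pvBD w) =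
         pvSplitA_go (PySem.Chars.split₀.go cs w.reverse []) d0 result)
    ∧ (∀ result buf (d0 : Int), buf ≠ [] → 0 < d0 →
       pvSplitB_go cs result buf true d0 =
         pvSplitA_go (PySem.Chars.split₀.go cs [] []) d0 (result ++ [buf]))
    ∧ (∀ result pre w (d0 : Int), w ≠ [] → 0 < d0 →
       pvSplitB_go cs result (pre ++ ' ' :: w) false (d0 + pvBD w) =
         pvSplitA_go (PySem.Chars.split₀.go cs w.reverse []) d0 (result ++ [pre])) := by
  induction cs with
  | nil =>
      refine ⟨?_, ?_, ?_⟩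
      · intro result w d0 hd0
        have h1 : ¬ (d0 > 0) := by omega
        cases w with
        | nil => simp [pvSplitB_go, pvFlush, PySem.Chars.split₀.go, pvSplitA_go]
        | cons a as =>
            simp [pvSplitB_go, pvFlush, PySem.Chars.split₀.go, pvSplitA_go, h1]
      · intro result buf d0 hb hd0
        simp [pvSplitB_go, pvFlush, hb, PySem.Chars.split₀.go, pvSplitA_go]
      · intro result pre w d0 hw hd0
        have h1 : d0 > 0 := hd0
        simp [pvSplitB_go, pvFlush, PySem.Chars.split₀.go, pvSplitA_go, hw, h1,
          pv_appendLast_append]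
  | cons c rest ih =>
      obtain ⟨ih1, ih2, ih3⟩ := ih
      refine ⟨?_, ?_, ?_⟩
      · intro result w d0 hd0
        by_cases hs : PySem.Chars.isspace c
        · cases w with
          | nil =>
              simp only [List.reverse_nil]
              rw [pv_go_space_nil c rest [] hs]
              simp only [pvSplitB_go, hs, if_true, pvBD, List.count_nil,
                Nat.cast_zero, sub_zero, add_zero, if_pos hd0, pvFlush]
              simpa [pvBD] using ih1 result [] d0 hd0
          | cons a as =>
              have h0 : ¬ (d0 > 0) := by omega
              have hne : (a :: as) ≠ [] := by simp
              rw [pv_go_space c rest (a :: as) hs hne, pvA_cons, if_neg h0]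
              simp only [pvSplitB_go, hs, if_true, if_neg hne]
              by_cases hdep : d0 + pvBD (a :: as) ≤ 0
              · rw [if_pos hdep]
                simp only [pvFlush, if_neg hne]
                simpa [pvBD] using
                  ih1 (result ++ [a :: as]) [] (d0 + pvBD (a :: as)) hdep
              · rw [if_neg hdep]
                exact ih2 result (a :: as) (d0 + pvBD (a :: as)) hne (by omega)
        · rw [pv_go_nonspace c rest w hs]
          have := ih1 result (w ++ [c]) d0 hd0
          rw [pvBD_append_singleton, ← add_assoc] at this
          simp only [pvSplitB_go, if_neg hs, Bool.false_eq_true, if_false]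
          simpa using this
      · intro result buf d0 hb hd0
        by_cases hs : PySem.Chars.isspace c
        · rw [pv_go_space_nil c rest [] hs]
          simp only [pvSplitB_go, hs, if_true, if_neg (by omega : ¬ d0 ≤ 0),
            if_neg hb]
          exact ih2 result buf d0 hb hd0
        · have hgo : PySem.Chars.split₀.go (c :: rest) [] [] =
              PySem.Chars.split₀.go rest [c] [] := by
            simp [PySem.Chars.split₀.go, hs]
          rw [hgo]
          have := ih3 result buf [c] d0 (by simp) hd0
          have hbd : pvBD [c] = pvCharDelta c := by
            have h := pvBD_append_singleton [] c
            simp only [List.nil_append] at h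
            rw [h]
            simp [pvBD]
          rw [hbd] at this
          simp only [List.reverse_singleton] at this
          simp only [pvSplitB_go, if_neg hs]
          simpa using this
      · intro result pre w d0 hw hd0
        by_cases hs : PySem.Chars.isspace c
        · have hbuf : pre ++ ' ' :: w ≠ [] := by simp
          rw [pv_go_space c rest w hs hw, pvA_cons, if_pos (by omega : d0 > 0),
            pv_appendLast_append]
          simp only [pvSplitB_go, hs, if_true]
          by_cases hdep : d0 + pvBD w ≤ 0
          · rw [if_pos hdep]
            simp only [pvFlush, if_neg hbuf]
            simpa [pvBD] using
              ih1 (result ++ [pre ++ ' ' :: w]) [] (d0 + pvBD w) hdep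
          · rw [if_neg hdep, if_neg hbuf]
            exact ih2 result (pre ++ ' ' :: w) (d0 + pvBD w) hbuf (by omega)
        · rw [pv_go_nonspace c rest w hs]
          have := ih3 result pre (w ++ [c]) d0 (by simp) hd0
          rw [pvBD_append_singleton, ← add_assoc] at this
          simp only [pvSplitB_go, if_neg hs, Bool.false_eq_true, if_false]
          simpa using this

-- ===== VERDICT (by name: the statement is the Claim_ definition above) =====
theorem split_get_output_spec : Claim_equal_split_get_output := by
  intro output _
  unfold Spec_split_get_output split_get_output split_get_output_alt
  have h := (pv_main output.toList).1 ([]) ([]) 0 le_rfl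
  simp only [List.reverse_nil, pvBD_nil, add_zero] at h
  rw [PySem.Chars.split₀] at *
  rw [← h]
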